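-- pv_equiv track=rewrite | github.com/abdizakiy/Scraping-Data-Request-Beautifulsoup | Sort Character (Abdi Zaki).py | sort_vowels_consonants
-- ===== SOURCE A (Python) =====
-- def sort_vowels_consonants(s):
--     vowels = []
--     consonants = []
--
--     s = s.lower().replace(" ", "")
--
--     for char in s:
--         if char in 'aeiou':
--             vowels.append(char)
--         else:
--             consonants.append(char)
--
--     vowels_sorted = ''.join(sorted(vowels, key=lambda x: s.index(x)))
--     consonants_sorted = ''.join(sorted(consonants, key=lambda x: s.index(x)))
--
--     return vowels_sorted, consonants_sorted
-- ===== SOURCE B (Python) =====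
-- def sort_vowels_consonants(s):
--     s = s.lower().replace(" ", "")
--     counts = {}
--     for ch in s:
--         counts[ch] = counts.get(ch, 0) + 1
--     vowels = ""
--     consonants = ""
--     for ch, n in counts.items():
--         if ch in 'aeiou':
--             vowels += ch * n
--         else:
--             consonants += ch * n
--     return vowels, consonants
-- ===== Notes on version B (the rewrite author's own statement) =====
-- stated objective: faster
-- what changed: B replaces A's two key-sorts (each key a repeated linear s.index scan) by one pass that builds an insertion-ordered char->count dict and one pass over its items emitting char*count, so no sorting and no index scans are performed.
import Mathlib
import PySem

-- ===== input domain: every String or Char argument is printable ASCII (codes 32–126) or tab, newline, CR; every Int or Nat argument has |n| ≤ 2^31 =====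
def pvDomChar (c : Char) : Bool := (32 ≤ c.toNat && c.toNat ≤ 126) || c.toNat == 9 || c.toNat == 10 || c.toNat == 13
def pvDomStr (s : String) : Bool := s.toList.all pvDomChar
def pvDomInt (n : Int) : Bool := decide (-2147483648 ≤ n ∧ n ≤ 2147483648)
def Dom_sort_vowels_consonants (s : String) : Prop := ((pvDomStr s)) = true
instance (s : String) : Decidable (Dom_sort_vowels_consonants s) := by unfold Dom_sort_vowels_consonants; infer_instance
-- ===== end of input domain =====

-- B groups the string through an insertion-ordered char->count dict instead of A's two stability-sorts
-- keyed by repeated s.index scans; the equivalence (A = B on every input) is proved below.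

-- the constant string 'aeiou' both Pythons test membership in
def pvVowels : List Char := ['a', 'e', 'i', 'o', 'u']

-- ===== PORT A =====
-- Python s.index(x) is ported as PySem.Chars.find: for every x the key is applied to, x occurs in
-- the string, so index never raises and equals find (the first-occurrence index); exact there.
def sort_vowels_consonants (s : String) : String × String :=
  let s2 := PySem.Str.replace (PySem.Str.lower s) " " ""
  let vc := s2.toList.foldl
    (fun (p : List Char × List Char) c =>
      if PySem.Chars.isIn [c] pvVowels then (p.1 ++ [c], p.2) else (p.1, p.2 ++ [c]))
    ([], [])
  let vs := PySem.List.sorted vc.1 (fun x => PySem.Chars.find s2.toList [x]) false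
  let cs := PySem.List.sorted vc.2 (fun x => PySem.Chars.find s2.toList [x]) false
  (PySem.Str.join "" (vs.map (fun c => String.ofList [c])),
   PySem.Str.join "" (cs.map (fun c => String.ofList [c])))

-- ===== PORT B =====
-- strings are built as List Char (Python's += on str) and converted once at the end; exact.
def sort_vowels_consonants_alt (s : String) : String × String :=
  let s2 := PySem.Str.replace (PySem.Str.lower s) " " ""
  let counts := s2.toList.foldl
    (fun (d : PySem.Dict Char Int) ch => d.insert ch (d.getD ch 0 + 1)) PySem.Dict.empty
  let vc := counts.items.foldl
    (fun (p : List Char × List Char) kv =>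
      if PySem.Chars.isIn [kv.1] pvVowels then (p.1 ++ List.replicate kv.2.toNat kv.1, p.2)
      else (p.1, p.2 ++ List.replicate kv.2.toNat kv.1))
    ([], [])
  (String.ofList vc.1, String.ofList vc.2)

-- ===== PRECONDITION & SPEC =====
def Spec_sort_vowels_consonants (s : String) (out : String × String) : Prop := out = sort_vowels_consonants_alt s
instance (s : String) (out : String × String) : Decidable (Spec_sort_vowels_consonants s out) := by unfold Spec_sort_vowels_consonants; infer_instance

-- ===== CLAIM (what is proved, stated in full; the proofs are below) =====
def Claim_equal_sort_vowels_consonants : Prop := ∀ (s : String), Dom_sort_vowels_consonants s → Spec_sort_vowels_consonants s (sort_vowels_consonants s)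

-- ===== LEMMAS AND PROOFS =====

-- A's two appending branches over any list, in one statement (used for both loops of both ports)
theorem pv_foldl_pair_split {α β : Type} (pr : α → Bool) (f : α → List β) :
    ∀ (l : List α) (v0 c0 : List β),
      l.foldl (fun p x => if pr x then (p.1 ++ f x, p.2) else (p.1, p.2 ++ f x)) (v0, c0)
      = (v0 ++ (l.filter pr).flatMap f, c0 ++ (l.filter (fun x => !pr x)).flatMap f) := by
  intro l
  induction l with
  | nil => intro v0 c0; simp
  | cons x l ih =>
    intro v0 c0
    by_cases h : pr x = true <;>
      simp [List.foldl_cons, h, ih]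

-- t[n] = c → idxOf c t ≤ n  (first occurrence is minimal)
theorem pv_idxOf_le_of_getElem {c : Char} :
    ∀ {t : List Char} {n : Nat} (hn : n < t.length), t[n] = c → t.idxOf c ≤ n := by
  intro t
  induction t with
  | nil => intro n hn; simp at hn
  | cons a l ih =>
    intro n hn hget
    by_cases hac : a = c
    · subst hac; simp [List.idxOf_cons_self]
    · cases n with
      | zero => simp at hget; exact absurd hget hac
      | succ m =>
        rw [List.idxOf_cons_ne _ hac]
        exact Nat.succ_le_succ (ih (Nat.lt_of_succ_lt_succ hn) (by simpa using hget))

-- for a character of t, Python's s.index/find is List.idxOf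
theorem pv_find_singleton_eq_idxOf {t : List Char} {c : Char} (h : c ∈ t) :
    PySem.Chars.find t [c] = (t.idxOf c : Int) := by
  have h0 : 0 ≤ PySem.Chars.find t [c] :=
    (PySem.Chars.find_nonneg_iff t [c]).mpr ((List.singleton_infix_iff c t).mpr h)
  obtain ⟨hpre, hmin⟩ := PySem.Chars.find_spec h0
  set n := (PySem.Chars.find t [c]).toNat with hn
  obtain ⟨u, hu⟩ := hpre
  have hgl : t[n]? = some c := by
    have h1 : (t.drop n)[0]? = some c := by rw [← hu]; rfl
    simpa [List.getElem?_drop] using h1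
  obtain ⟨hlen, hget⟩ := List.getElem?_eq_some_iff.mp hgl
  have hidx_lt : t.idxOf c < t.length := List.idxOf_lt_length_iff.mpr h
  have h1 : ¬ t.idxOf c < n := by
    intro hc
    apply hmin _ hc
    rw [List.drop_eq_getElem_cons hidx_lt, List.getElem_idxOf hidx_lt]
    exact ⟨_, rfl⟩
  have h2 : t.idxOf c ≤ n := pv_idxOf_le_of_getElem hlen hget
  have h3 : t.idxOf c = n := le_antisymm h2 (Nat.le_of_not_lt h1)
  rw [← Int.toNat_of_nonneg h0, ← hn, h3]

-- the distinct characters, in first-occurrence order, have strictly increasing first indices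
theorem pv_pairwise_idxOf_ofList :
    ∀ (t : List Char), (PySem.Set.ofList t).Pairwise (fun a b => t.idxOf a < t.idxOf b) := by
  intro t
  induction t with
  | nil => simp [PySem.Set.ofList]
  | cons x t ih =>
    rw [PySem.Set.ofList_cons]
    refine List.Pairwise.cons ?_ ?_
    · intro b hb
      obtain ⟨hbm, hbx⟩ := (PySem.Set.mem_discard _ x b).mp hb
      rw [List.idxOf_cons_self, List.idxOf_cons_ne _ (Ne.symm hbx)]
      exact Nat.succ_pos _
    · have h2 : ((PySem.Set.ofList t).discard x).Pairwise (fun a b => t.idxOf a < t.idxOf b) :=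
        List.Pairwise.filter _ ih
      refine h2.imp_of_mem ?_
      intro a b ha hb hlt
      have hax := ((PySem.Set.mem_discard _ x a).mp ha).2
      have hbx := ((PySem.Set.mem_discard _ x b).mp hb).2
      rw [List.idxOf_cons_ne _ (Ne.symm hax), List.idxOf_cons_ne _ (Ne.symm hbx)]
      omega

-- counting inside a concatenation of replicate-blocks with distinct block letters
theorem pv_count_flatMap_replicate (g : Char → Nat) :
    ∀ (l : List Char), l.Nodup → ∀ (a : Char),
      (l.flatMap (fun c => List.replicate (g c) c)).count a = if a ∈ l then g a else 0 := by
  intro l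
  induction l with
  | nil => intro _ a; simp
  | cons c l ih =>
    intro hnd a
    obtain ⟨hcl, hnd'⟩ := List.nodup_cons.mp hnd
    rw [List.flatMap_cons, List.count_append, List.count_replicate, ih hnd' a]
    by_cases hac : a = c
    · subst hac
      simp [hcl]
    · simp [hac, Ne.symm hac]

-- MAIN LEMMA: A's stable sort by first-occurrence index equals B's per-character blocks
-- in first-occurrence order, for any character predicate pr used as the filter.
theorem pv_sorted_filter_eq_blocks (t : List Char) (pr : Char → Bool) :
    PySem.List.sorted (t.filter pr) (fun x => PySem.Chars.find t [x]) false
      = ((PySem.Set.ofList t).filter pr).flatMap (fun c => List.replicate (t.count c) c) := by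
  have hkey : ∀ c ∈ t, PySem.Chars.find t [c] = (t.idxOf c : Int) := fun c hc =>
    pv_find_singleton_eq_idxOf hc
  have hmemb : ∀ b ∈ ((PySem.Set.ofList t).filter pr).flatMap
      (fun c => List.replicate (t.count c) c), b ∈ t := by
    intro b hb
    obtain ⟨c, hc, hbc⟩ := List.mem_flatMap.mp hb
    obtain ⟨-, rfl⟩ := List.mem_replicate.mp hbc
    exact (PySem.Set.mem_ofList t b).mp (List.mem_filter.mp hc).1
  have hperm : (((PySem.Set.ofList t).filter pr).flatMap
      (fun c => List.replicate (t.count c) c)).Perm (t.filter pr) := by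
    rw [List.perm_iff_count]
    intro a
    rw [pv_count_flatMap_replicate _ _ ((PySem.Set.nodup_ofList t).filter _) a]
    by_cases hpa : pr a = true
    · rw [List.count_filter hpa]
      by_cases hat : a ∈ t
      · simp [List.mem_filter, PySem.Set.mem_ofList, hat, hpa]
      · have hz : t.count a = 0 := List.count_eq_zero.mpr hat
        simp [List.mem_filter, PySem.Set.mem_ofList, hat, hz]
    · have h1 : a ∉ t.filter pr := by simp [List.mem_filter, hpa]
      rw [List.count_eq_zero.mpr h1]
      simp [List.mem_filter, PySem.Set.mem_ofList, hpa]
  refine List.eq_of_perm_of_sorted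
    (le := fun a b => PySem.Chars.find t [a] ≤ PySem.Chars.find t [b]) ?_ ?_ ?_ ?_
  · intro a b ha hb hab hba
    have hat : a ∈ t := (List.mem_filter.mp
      ((PySem.List.mem_sorted _ _ _ a).mp ha)).1
    have hbt : b ∈ t := hmemb b hb
    have heq : PySem.Chars.find t [a] = PySem.Chars.find t [b] := le_antisymm hab hba
    rw [hkey a hat, hkey b hbt] at heq
    have heq' : t.idxOf a = t.idxOf b := Int.natCast_inj.mp heq
    have ha' := List.getElem_idxOf (List.idxOf_lt_length_iff.mpr hat)
    have hb' := List.getElem_idxOf (List.idxOf_lt_length_iff.mpr hbt)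
    rw [← ha', ← hb']
    simp [heq']
  · exact PySem.List.sorted_pairwise _ _
  · rw [List.pairwise_flatMap]
    constructor
    · intro c hc
      refine List.pairwise_replicate.mpr ?_
      exact Or.inr (le_refl _)
    · have hp := (pv_pairwise_idxOf_ofList t).filter pr
      refine hp.imp_of_mem ?_
      intro a b ha hb hlt x hx y hy
      obtain ⟨-, hxa⟩ := List.mem_replicate.mp hx
      obtain ⟨-, hyb⟩ := List.mem_replicate.mp hy
      rw [hxa, hyb]
      have hat : a ∈ t := (PySem.Set.mem_ofList t a).mp (List.mem_filter.mp ha).1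
      have hbt : b ∈ t := (PySem.Set.mem_ofList t b).mp (List.mem_filter.mp hb).1
      rw [hkey a hat, hkey b hbt]
      exact_mod_cast le_of_lt hlt
  · exact (PySem.List.sorted_perm _ _ _).trans hperm.symm

-- ''.join over singleton strings is String.ofList
theorem pv_join_singletons (vs : List Char) :
    PySem.Str.join "" (vs.map (fun c => String.ofList [c])) = String.ofList vs := by
  have h : (PySem.Str.join "" (vs.map (fun c => String.ofList [c]))).toList = vs := by
    rw [PySem.Str.toList_join]
    simp only [List.map_map]
    have h2 : (vs.map (fun c => (String.ofList [c]).toList)) = vs.map (fun c => [c]) := by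
      simp
    simp only [Function.comp_def]
    rw [h2]
    have h3 : ("" : String).toList = [] := rfl
    rw [h3, PySem.Chars.join_nil_singletons]
  calc PySem.Str.join "" (vs.map (fun c => String.ofList [c]))
      = String.ofList (PySem.Str.join "" (vs.map (fun c => String.ofList [c]))).toList := by
        rw [String.ofList_toList]
    _ = String.ofList vs := by rw [h]

-- ===== VERDICT (by name: the statement is the Claim_ definition above) =====
theorem sort_vowels_consonants_spec : Claim_equal_sort_vowels_consonants := by
  intro s _
  unfold Spec_sort_vowels_consonants sort_vowels_consonants sort_vowels_consonants_alt
  simp only []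
  set t := (PySem.Str.replace (PySem.Str.lower s) " " "").toList with ht
  set pr : Char → Bool := fun c => PySem.Chars.isIn [c] pvVowels with hpr
  -- A's classification loop
  rw [pv_foldl_pair_split pr (fun c => [c]) t [] []]
  -- B's counting loop is Counter(t)
  rw [PySem.Dict.foldl_insert_getD_add_one_eq_counter, PySem.Dict.items_counter]
  -- B's emission loop
  rw [pv_foldl_pair_split (fun kv => PySem.Chars.isIn [kv.1] pvVowels)
        (fun kv : Char × Int => List.replicate kv.2.toNat kv.1) _ [] []]
  simp only [List.nil_append, List.flatMap_singleton', List.filter_map, List.flatMap_map,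
    Function.comp_def, Int.toNat_natCast]
  rw [pv_join_singletons, pv_join_singletons,
      pv_sorted_filter_eq_blocks t pr, pv_sorted_filter_eq_blocks t (fun c => !pr c)]
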